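-- pv_equiv track=rewrite | github.com/AadityaSrinivasan/ResumeBuilder | readRes.py | refineEdus
-- ===== SOURCE A (Python) =====
-- def refineEdus(edus):
--     sorted_education_list = sorted(edus, key=len)
--     # Initialize a new list to store the unique values
--
--
--     # Iterate through the list and compare each string with all other strings
--     numLen = 0
--     for i in range(0,len(sorted_education_list)):
--         j = i
--         while(j< len(sorted_education_list)):
--             if sorted_education_list[i] in sorted_education_list[j] and i!=j:
--                 sorted_education_list.pop(j)
--                 j-=1
--             else:
--                 j+=1
--     return sorted_education_list
-- ===== SOURCE B (Python) =====
-- def refineEdus(edus):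
--     result = []
--     for s in sorted(edus, key=len):
--         if not any(k in s for k in result):
--             result.append(s)
--     return result
-- ===== Notes on version B (the rewrite author's own statement) =====
-- stated objective: simpler
-- what changed: Replaces A's in-place pop/index-decrement mutation of the length-sorted list (rescanning all later positions for each index) by a single fold that builds a fresh result list, appending a string only if no already-kept string is a substring of it; the inner scan runs over the few kept survivors instead of all later positions and no O(n) pops occur.
import Mathlib
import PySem

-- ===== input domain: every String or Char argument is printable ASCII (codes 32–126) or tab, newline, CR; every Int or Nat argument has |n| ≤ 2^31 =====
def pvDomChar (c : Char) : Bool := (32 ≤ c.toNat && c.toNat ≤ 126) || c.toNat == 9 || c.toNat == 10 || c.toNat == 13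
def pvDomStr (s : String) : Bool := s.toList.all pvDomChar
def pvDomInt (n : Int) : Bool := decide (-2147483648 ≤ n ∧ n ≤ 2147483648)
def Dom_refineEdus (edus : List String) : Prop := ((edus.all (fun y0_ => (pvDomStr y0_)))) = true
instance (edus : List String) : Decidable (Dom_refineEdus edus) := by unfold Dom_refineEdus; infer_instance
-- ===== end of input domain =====

-- B replaces A's in-place pop/index-juggling over the sorted list by a single fold that
-- appends a string only if no already-kept string is a substring of it (objective: simpler).

-- ===== PORT A =====
-- inner `while j < len(lst)` loop of A; `lst.pop(j)` is `lst.take j ++ lst.drop (j+1)`,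
-- exact since it only runs with j < lst.length; lst[i]/lst[j] are always in range on
-- reachable states (i ≤ j < len), ported as getD.
def pvInnerA (lst : List String) (i j : Nat) : List String :=
  if j < lst.length then
    if PySem.Str.isIn (lst.getD i "") (lst.getD j "") && !(i == j) then
      pvInnerA (lst.take j ++ lst.drop (j + 1)) i (j - 1)
    else
      pvInnerA lst i (j + 1)
  else lst
termination_by 2 * lst.length - j
decreasing_by
  · simp only [List.length_append, List.length_take, List.length_drop]; omega
  · omega

def refineEdus (edus : List String) : List String :=
  let sorted_education_list := PySem.List.sorted edus (fun s => PySem.Str.len s) false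
  (List.range sorted_education_list.length).foldl
    (fun lst i => pvInnerA lst i i) sorted_education_list

-- ===== PORT B =====
def pvStepB (result : List String) (s : String) : List String :=
  if result.any (fun k => PySem.Str.isIn k s) then result else result ++ [s]

def refineEdus_alt (edus : List String) : List String :=
  (PySem.List.sorted edus (fun s => PySem.Str.len s) false).foldl pvStepB []

-- ===== PRECONDITION & SPEC =====
def Spec_refineEdus (edus : List String) (out : List String) : Prop := out = refineEdus_alt edus
instance (edus : List String) (out : List String) : Decidable (Spec_refineEdus edus out) := by unfold Spec_refineEdus; infer_instance

-- ===== CLAIM (what is proved, stated in full; the proofs are below) =====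
def Claim_equal_refineEdus : Prop := ∀ (edus : List String), Dom_refineEdus edus → Spec_refineEdus edus (refineEdus edus)

-- ===== LEMMAS AND PROOFS =====

-- A's inner loop keeps positions < j (all already checked, hence not containing lst[i])
-- and filters from position max j (i+1) on the strings containing lst[i].
theorem pvInnerA_eq (L : List String) (i j : Nat) :
    i ≤ j →
    (∀ k, i < k → k < j → PySem.Str.isIn (L.getD i "") (L.getD k "") = false) →
    pvInnerA L i j =
      L.take (max j (i + 1)) ++
        (L.drop (max j (i + 1))).filter
          (fun t => !PySem.Str.isIn (L.getD i "") t) := by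
  induction L, j using pvInnerA.induct (i := i) with
  | case1 L j hlt hcond ih =>
      intro hij H
      have hcond' := hcond
      simp only [Bool.and_eq_true] at hcond'
      have hne : i ≠ j := by simpa using hcond'.2
      have hlti : i < j := lt_of_le_of_ne hij hne
      have hiIn : PySem.Str.isIn (L.getD i "") (L.getD j "") = true := hcond'.1
      rw [pvInnerA, if_pos hlt, if_pos hcond]
      -- the popped list
      set L' := L.take j ++ L.drop (j + 1) with hL'
      have hlen' : L'.length = L.length - 1 := by
        simp [hL']; omega
      have hgetlt : ∀ k, k < j → L'.getD k "" = L.getD k "" := by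
        intro k hk
        have hklen : k < (L.take j).length := by
          simp [List.length_take]; omega
        simp [hL', List.getD, List.getElem?_append_left hklen,
          List.getElem?_take_of_lt hk]
      have hgi : L'.getD i "" = L.getD i "" := hgetlt i hlti
      have H' : ∀ k, i < k → k < j - 1 →
          PySem.Str.isIn (L'.getD i "") (L'.getD k "") = false := by
        intro k h1 h2
        rw [hgi, hgetlt k (by omega)]
        exact H k h1 (by omega)
      rw [ih (by omega) H', hgi]
      set m' := max (j - 1) (i + 1) with hm'
      have hm'j : m' ≤ j := by omega
      have hm'i : i + 1 ≤ m' := by omega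
      have hjtlen : (L.take j).length = j := by
        simp [List.length_take]; omega
      have htk : L'.take m' = L.take m' := by
        rw [hL', List.take_append_of_le_length (by omega : m' ≤ (L.take j).length),
          List.take_take]
        congr 1; omega
      have hdr : L'.drop m' = (L.take j).drop m' ++ L.drop (j + 1) := by
        rw [hL', List.drop_append_of_le_length (by omega : m' ≤ (L.take j).length)]
      have hfself :
          ((L.take j).drop m').filter (fun t => !PySem.Str.isIn (L.getD i "") t)
            = (L.take j).drop m' := by
        apply List.filter_eq_self.mpr
        intro a ha
        rcases List.mem_iff_getElem.mp ha with ⟨t, ht, rfl⟩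
        have hlen2 : ((L.take j).drop m').length = j - m' := by
          simp [List.length_drop, hjtlen]
        have hkj : m' + t < j := by omega
        have hkL : m' + t < L.length := by omega
        have hel : ((L.take j).drop m')[t] = L[m' + t] := by
          simp [List.getElem_drop, List.getElem_take]
        rw [hel]
        have := H (m' + t) (by omega) hkj
        rw [List.getD_eq_getElem L "" hkL] at this
        simp only [PySem.Str.isIn_eq, List.getD] at this ⊢
        simp [this]
      have hgdj : L.getD j "" = L[j] := List.getD_eq_getElem L "" hlt
      have hdropj : L.drop j = L[j] :: L.drop (j + 1) :=
        List.drop_eq_getElem_cons hlt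
      have e2 : max j (i + 1) = j := by omega
      rw [e2, hdropj, List.filter_cons]
      have hIn2 : PySem.Str.isIn (L.getD i "") L[j] = true := hgdj ▸ hiIn
      rw [if_neg (by rw [hIn2]; simp)]
      rw [htk, hdr, List.filter_append, hfself, ← List.append_assoc]
      have : L.take m' ++ (L.take j).drop m' = L.take j := by
        conv_lhs => rw [show L.take m' = (L.take j).take m' by
          rw [List.take_take]; congr 1; omega]
        exact List.take_append_drop m' (L.take j)
      rw [this]
  | case2 L j hlt hcond ih =>
      intro hij H
      rw [pvInnerA, if_pos hlt, if_neg hcond]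
      by_cases hieq : i = j
      · subst hieq
        have := ih (by omega) (fun k h1 h2 => absurd h1 (by omega))
        rw [this]
        have e1 : max (i + 1) (i + 1) = i + 1 := by omega
        have e2 : max i (i + 1) = i + 1 := by omega
        rw [e1, e2]
      · have hlti : i < j := lt_of_le_of_ne hij hieq
        have hne' : (i == j) = false := by simp [hieq]
        rw [hne'] at hcond
        have hiIn : PySem.Str.isIn (L.getD i "") (L.getD j "") = false := by
          simpa using hcond
        have H' : ∀ k, i < k → k < j + 1 →
            PySem.Str.isIn (L.getD i "") (L.getD k "") = false := by
          intro k h1 h2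
          rcases Nat.lt_or_ge k j with h | h
          · exact H k h1 h
          · have : k = j := by omega
            subst this; exact hiIn
        rw [ih (by omega) H']
        have e1 : max (j + 1) (i + 1) = j + 1 := by omega
        have e2 : max j (i + 1) = j := by omega
        rw [e1, e2]
        have hgd : L.getD j "" = L[j] := List.getD_eq_getElem L "" hlt
        have hdrop : L.drop j = L[j] :: L.drop (j + 1) :=
          List.drop_eq_getElem_cons hlt
        have htake : L.take (j + 1) = L.take j ++ [L[j]] := by
          rw [List.take_add_one]
          simp [List.getElem?_eq_getElem hlt]
        rw [htake, hdrop, List.filter_cons]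
        have hIn2 : PySem.Str.isIn (L.getD i "") L[j] = false := hgd ▸ hiIn
        have hcondf : (!PySem.Str.isIn (L.getD i "") L[j]) = true := by
          rw [hIn2]; rfl
        rw [if_pos hcondf, List.append_assoc, List.singleton_append]
  | case3 L j hge =>
      intro hij H
      rw [pvInnerA, if_neg hge]
      have h1 : L.length ≤ max j (i + 1) := by omega
      rw [List.take_of_length_le h1, List.drop_of_length_le h1]
      simp

-- once the running index has passed the (only ever shrinking) list, the loop is a no-op
theorem pvFold_ge (n s : Nat) (L : List String) (h : L.length ≤ s) :
    (List.range' s n).foldl (fun lst i => pvInnerA lst i i) L = L := by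
  induction n generalizing s with
  | zero => rfl
  | succ n ih =>
      rw [List.range'_succ, List.foldl_cons]
      rw [pvInnerA]
      simp only [if_neg (by omega : ¬ s < L.length)]
      exact ih (s + 1) (by omega)

-- strings already eliminated by a kept string are skipped by B's fold unchanged
theorem pvFold_filter (x : String) (T acc : List String) (hx : x ∈ acc) :
    (T.filter (fun t => !PySem.Str.isIn x t)).foldl pvStepB acc = T.foldl pvStepB acc := by
  induction T generalizing acc with
  | nil => rfl
  | cons t T ih =>
      by_cases hs : PySem.Str.isIn x t = true
      · rw [List.filter_cons, if_neg (by simpa using hs)]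
        rw [List.foldl_cons]
        have hstep : pvStepB acc t = acc := by
          unfold pvStepB
          rw [if_pos]
          exact List.any_eq_true.mpr ⟨x, hx, hs⟩
        rw [hstep]
        exact ih acc hx
      · rw [List.filter_cons, if_pos (by simpa using hs)]
        rw [List.foldl_cons, List.foldl_cons]
        refine ih (pvStepB acc t) ?_
        unfold pvStepB
        split <;> simp [hx]

-- main invariant: A's outer loop on P ++ S, about to process index |P|, computes B's fold
theorem pvOuter_eq (n : Nat) (P S : List String) (hn : S.length ≤ n)
    (H : ∀ s ∈ S, ∀ p ∈ P, PySem.Str.isIn p s = false) :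
    (List.range' P.length n).foldl (fun lst i => pvInnerA lst i i) (P ++ S) =
      S.foldl pvStepB P := by
  induction n generalizing P S with
  | zero =>
      have hS : S = [] := List.eq_nil_of_length_eq_zero (by omega)
      subst hS; simp
  | succ n ih =>
      cases S with
      | nil =>
          simpa using pvFold_ge (n + 1) P.length P (le_refl _)
      | cons x T =>
          rw [List.range'_succ, List.foldl_cons]
          have hget : (P ++ x :: T).getD P.length "" = x := by
            simp [List.getD]
          have hstep1 : pvInnerA (P ++ x :: T) P.length P.length =
              (P ++ [x]) ++ T.filter (fun t => !PySem.Str.isIn x t) := by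
            have h := pvInnerA_eq (P ++ x :: T) P.length P.length (le_refl _)
              (fun k hk1 hk2 => absurd (lt_trans hk1 hk2) (lt_irrefl _))
            rw [h, hget]
            have hmax : max P.length (P.length + 1) = P.length + 1 := by omega
            rw [hmax]
            have h1 : P ++ x :: T = (P ++ [x]) ++ T := by simp
            have hlen : (P ++ [x]).length = P.length + 1 := by simp
            rw [h1, List.take_left' hlen, List.drop_left' hlen]
          rw [hstep1]
          have hlen' : (P ++ [x]).length = P.length + 1 := by simp
          have hH' : ∀ s ∈ T.filter (fun t => !PySem.Str.isIn x t),
              ∀ p ∈ P ++ [x], PySem.Str.isIn p s = false := by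
            intro s hs p hp
            rcases List.mem_filter.mp hs with ⟨hsT, hsx⟩
            rcases List.mem_append.mp hp with hpP | hpx
            · exact H s (List.mem_cons_of_mem _ hsT) p hpP
            · have : p = x := by simpa using hpx
              subst this
              simpa using hsx
          have hlenf : (T.filter (fun t => !PySem.Str.isIn x t)).length ≤ n := by
            have := List.length_filter_le (fun t => !PySem.Str.isIn x t) T
            simp at hn; omega
          have := ih (P ++ [x]) (T.filter (fun t => !PySem.Str.isIn x t)) hlenf hH'
          rw [hlen'] at this
          rw [this]
          have hskip := pvFold_filter x T (P ++ [x]) (by simp)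
          rw [hskip]
          have hpx : pvStepB P x = P ++ [x] := by
            unfold pvStepB
            rw [if_neg]
            simp only [List.any_eq_true, not_exists]
            intro k hk
            have hfalse := H x List.mem_cons_self k hk.1
            simp only [PySem.Str.isIn_eq] at hfalse
            simp [hfalse] at hk
          rw [List.foldl_cons, hpx]

-- ===== VERDICT (by name: the statement is the Claim_ definition above) =====
theorem refineEdus_spec : Claim_equal_refineEdus := by
  intro edus _
  unfold Spec_refineEdus refineEdus refineEdus_alt
  set L := PySem.List.sorted edus (fun s => PySem.Str.len s) false with hL
  have h := pvOuter_eq L.length [] L (le_refl _) (by simp)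
  simpa [List.range_eq_range'] using h
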